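-- pv_equiv track=rewrite | github.com/comfort-framework/comfort | src/main/resources/dependency_extract.py | get_init_for_imported_module
-- ===== SOURCE A (Python) =====
-- def get_init_for_imported_module(imported_module, module_names):
--     """ Get the init modules for an imported module, e.g., if foo.bar.mod1 is imported, than also foo and foo.bar """
--     init_modules = set()
--     parts = imported_module.split(".")[0:-1]
--     i = 1
--     for import_name in range(0, len(parts)):
--         init_module = ".".join(parts[0:i])
--         if init_module in module_names:
--             init_modules.add(init_module)
--         i += 1
--     return init_modules
-- ===== SOURCE B (Python) =====
-- def get_init_for_imported_module(imported_module, module_names):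
--     """ Get the init modules for an imported module, e.g., if foo.bar.mod1 is imported, than also foo and foo.bar """
--     init_modules = set()
--     prefix = ""
--     for ch in imported_module:
--         if ch == ".":
--             if prefix in module_names:
--                 init_modules.add(prefix)
--         prefix += ch
--     return init_modules
-- ===== Notes on version B (the rewrite author's own statement) =====
-- stated objective: alternative
-- what changed: B replaces split-into-parts plus a per-depth join-and-slice loop by a single left-to-right scan of the module string that grows the prefix one character at a time and tests it for membership at each dot.
import Mathlib
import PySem

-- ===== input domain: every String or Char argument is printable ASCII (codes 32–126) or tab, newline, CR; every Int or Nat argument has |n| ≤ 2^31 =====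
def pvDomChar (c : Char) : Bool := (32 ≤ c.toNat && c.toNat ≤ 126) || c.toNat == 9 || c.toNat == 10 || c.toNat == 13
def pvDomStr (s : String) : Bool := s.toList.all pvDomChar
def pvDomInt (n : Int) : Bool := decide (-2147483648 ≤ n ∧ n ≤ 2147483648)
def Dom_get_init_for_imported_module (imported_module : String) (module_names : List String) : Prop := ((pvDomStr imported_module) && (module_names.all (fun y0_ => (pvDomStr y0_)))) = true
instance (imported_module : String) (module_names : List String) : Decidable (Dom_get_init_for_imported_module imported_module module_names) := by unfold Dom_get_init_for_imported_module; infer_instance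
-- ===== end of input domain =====

-- B scans the module path once, char by char, testing the accumulated prefix at each dot,
-- instead of splitting into parts and re-joining a slice per depth (objective: alternative).
-- Both programs return a Python set; the ports return it in first-insertion order, which coincides.

-- ===== PORT A =====
def get_init_for_imported_module (imported_module : String) (module_names : List String) : List String :=
  -- parts = imported_module.split(".")[0:-1] ; sep is the literal "." so split? is always `some`
  -- and the `.getD []` branch is never taken (pure totalization, not a behaviour choice).
  let parts := PySem.List.slice ((PySem.Str.split? imported_module ".").getD []) (some 0) (some (-1))
  -- i = 1; for import_name in range(0, len(parts)): …
  (PySem.List.pyRange 0 (parts.length : Int) 1).foldl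
    (fun (st : PySem.Set String × Int) _ =>
      let init_module := PySem.Str.join "." (PySem.List.slice parts (some 0) (some st.2))
      (if module_names.contains init_module then PySem.Set.add st.1 init_module else st.1,
       st.2 + 1))
    (PySem.Set.empty, 1) |>.1

-- ===== PORT B =====
def get_init_for_imported_module_alt (imported_module : String) (module_names : List String) : List String :=
  -- prefix = ""; for ch in imported_module: if ch == ".": (test prefix, maybe add); prefix += ch
  (imported_module.toList.foldl
    (fun (st : PySem.Set String × String) ch =>
      ((if ch = '.' then
          (if module_names.contains st.2 then PySem.Set.add st.1 st.2 else st.1)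
        else st.1),
       st.2.push ch))
    (PySem.Set.empty, "")).1

-- ===== PRECONDITION & SPEC =====
def Spec_get_init_for_imported_module (imported_module : String) (module_names : List String) (out : List String) : Prop := out = get_init_for_imported_module_alt imported_module module_names
instance (imported_module : String) (module_names : List String) (out : List String) : Decidable (Spec_get_init_for_imported_module imported_module module_names out) := by unfold Spec_get_init_for_imported_module; infer_instance

-- ===== CLAIM (what is proved, stated in full; the proofs are below) =====
def Claim_equal_get_init_for_imported_module : Prop := ∀ (imported_module : String) (module_names : List String), Dom_get_init_for_imported_module imported_module module_names → Spec_get_init_for_imported_module imported_module module_names (get_init_for_imported_module imported_module module_names)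

-- ===== LEMMAS AND PROOFS =====

-- structural version of split(".") on char lists
def pvSplitDots : List Char → List (List Char)
  | [] => [[]]
  | c :: cs => if c = '.' then [] :: pvSplitDots cs else (pvSplitDots cs).modifyHead (c :: ·)

lemma pvSplitDots_ne_nil (cs : List Char) : pvSplitDots cs ≠ [] := by
  cases cs with
  | nil => simp [pvSplitDots]
  | cons c cs =>
    simp only [pvSplitDots]
    split_ifs
    · simp
    · cases h : pvSplitDots cs with
      | nil => exact absurd h (pvSplitDots_ne_nil cs)
      | cons a t => simp

lemma pvSplitDots_cons_dot (cs : List Char) : pvSplitDots ('.' :: cs) = [] :: pvSplitDots cs := by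
  simp [pvSplitDots]

lemma pvSplitDots_cons_ne {c : Char} (cs : List Char) (h : c ≠ '.') :
    pvSplitDots (c :: cs) = (pvSplitDots cs).modifyHead (c :: ·) := by
  simp [pvSplitDots, h]

lemma splitOn_go_spec (cs : List Char) : ∀ (fuel : Nat) (cur : List Char) (acc : List (List Char)),
    cs.length < fuel →
    PySem.Chars.splitOn.go ['.'] fuel cs cur acc
      = acc.reverse ++ (pvSplitDots cs).modifyHead (cur.reverse ++ ·) := by
  induction cs with
  | nil =>
    intro fuel cur acc h
    match fuel with
    | fuel + 1 => rw [PySem.Chars.splitOn.go.eq_def]; simp [pvSplitDots]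
  | cons c cs ih =>
    intro fuel cur acc h
    match fuel with
    | fuel + 1 =>
      rw [PySem.Chars.splitOn.go.eq_def]
      simp only []
      by_cases hc : c = '.'
      · subst hc
        have hpre : List.isPrefixOf ['.'] ('.' :: cs) = true := by
          simp [List.isPrefixOf]
        rw [if_pos hpre]
        have hgo := ih fuel [] (cur.reverse :: acc) (by simpa using Nat.lt_of_succ_lt_succ h)
        rw [show List.drop (['.'] : List Char).length ('.' :: cs) = cs from rfl] at *
        rw [hgo, pvSplitDots_cons_dot]
        cases hsp : pvSplitDots cs with
        | nil => exact absurd hsp (pvSplitDots_ne_nil cs)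
        | cons a t => simp
      · have hpre : List.isPrefixOf ['.'] (c :: cs) = false := by
          simp [List.isPrefixOf]
          exact fun hh => absurd hh.symm hc
        rw [if_neg (by simp [hpre])]
        have hgo := ih fuel (c :: cur) acc (Nat.lt_of_succ_lt_succ h)
        rw [hgo, pvSplitDots_cons_ne cs hc]
        cases hsp : pvSplitDots cs with
        | nil => exact absurd hsp (pvSplitDots_ne_nil cs)
        | cons a t => simp

lemma splitOn_eq_pvSplitDots (cs : List Char) :
    PySem.Chars.splitOn cs ['.'] = pvSplitDots cs := by
  have h := splitOn_go_spec cs (cs.length + 1) [] [] (Nat.lt_succ_self _)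
  unfold PySem.Chars.splitOn at *
  rw [h]
  cases hsp : pvSplitDots cs with
  | nil => exact absurd hsp (pvSplitDots_ne_nil cs)
  | cons a t => simp

-- char-level candidate prefixes: one candidate per '.', the text before it (with accumulator pref)
def pvCandC (pref : List Char) : List Char → List (List Char)
  | [] => []
  | c :: cs => if c = '.' then pref :: pvCandC (pref ++ [c]) cs else pvCandC (pref ++ [c]) cs

lemma pvCandC_cons_dot (pref cs : List Char) :
    pvCandC pref ('.' :: cs) = pref :: pvCandC (pref ++ ['.']) cs := by
  simp [pvCandC]

lemma pvCandC_cons_ne {c : Char} (pref cs : List Char) (h : c ≠ '.') :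
    pvCandC pref (c :: cs) = pvCandC (pref ++ [c]) cs := by
  simp [pvCandC, h]

-- the membership-filtered set insertion both ports perform
def pvAddIf (module_names : List String) (s : PySem.Set String) (x : String) : PySem.Set String :=
  if module_names.contains x then PySem.Set.add s x else s

-- A's loop with its (set, i) state is a fold of pvAddIf over its candidate strings
lemma loopA (mn : List String) (cand : Int → String) (l : List Int) :
    ∀ (s : PySem.Set String) (i : Int),
    l.foldl (fun (st : PySem.Set String × Int) _ =>
        (if mn.contains (cand st.2) then PySem.Set.add st.1 (cand st.2) else st.1, st.2 + 1)) (s, i)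
      = (((List.range l.length).map (fun k : Nat => cand (i + (k : Int)))).foldl (pvAddIf mn) s, i + l.length) := by
  induction l with
  | nil => intro s i; simp
  | cons a t ih =>
    intro s i
    simp only [List.foldl_cons, List.length_cons]
    rw [ih, List.range_succ_eq_map, List.map_cons, List.map_map, List.foldl_cons]
    rw [Prod.mk.injEq]
    refine ⟨?_, by push_cast; ring⟩
    have hl : (List.range t.length).map (fun k : Nat => cand (i + 1 + (k : Int)))
        = (List.range t.length).map ((fun k : Nat => cand (i + (k : Int))) ∘ Nat.succ) := by
      apply List.map_congr_left
      intro k _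
      simp only [Function.comp_apply]
      congr 1
      push_cast [Nat.succ_eq_add_one]
      ring
    rw [← hl]
    congr 1
    simp [pvAddIf]

-- B's loop is a fold of pvAddIf over pvCandC
lemma loopB (mn : List String) (cs : List Char) :
    ∀ (s : PySem.Set String) (pref : String),
    (cs.foldl (fun (st : PySem.Set String × String) ch =>
        ((if ch = '.' then
            (if mn.contains st.2 then PySem.Set.add st.1 st.2 else st.1)
          else st.1), st.2.push ch)) (s, pref)).1
      = ((pvCandC pref.toList cs).map String.ofList).foldl (pvAddIf mn) s := by
  induction cs with
  | nil => intro s pref; simp [pvCandC]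
  | cons c cs ih =>
    intro s pref
    simp only [List.foldl_cons]
    rw [ih]
    by_cases hc : c = '.'
    · subst hc
      rw [pvCandC_cons_dot, List.map_cons, List.foldl_cons, String.toList_push]
      simp [pvAddIf, String.ofList_toList]
    · rw [pvCandC_cons_ne _ _ hc, String.toList_push]
      simp [hc]

-- the crux: the split/join prefixes are exactly the char-scan candidates
lemma cand_eq (cs : List Char) : ∀ (pref : List Char),
    pvCandC pref cs
      = (List.range ((pvSplitDots cs).length - 1)).map
          (fun k => pref ++ PySem.Chars.join ['.'] ((pvSplitDots cs).take (k + 1))) := by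
  induction cs with
  | nil => intro pref; simp [pvCandC, pvSplitDots]
  | cons c cs ih =>
    intro pref
    by_cases hc : c = '.'
    · subst hc
      rw [pvCandC_cons_dot, pvSplitDots_cons_dot, ih]
      obtain ⟨n, hn⟩ : ∃ n, (pvSplitDots cs).length = n + 1 := by
        cases hsp : pvSplitDots cs with
        | nil => exact absurd hsp (pvSplitDots_ne_nil cs)
        | cons a t => exact ⟨t.length, by simp⟩
      rw [List.length_cons, hn, Nat.add_sub_cancel, Nat.add_sub_cancel,
          List.range_succ_eq_map, List.map_cons, List.map_map]
      refine List.cons_eq_cons.mpr ⟨?_, ?_⟩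
      · simp [PySem.Chars.join_singleton]
      · apply List.map_congr_left
        intro k hk
        simp only [List.mem_range] at hk
        simp only [Function.comp_apply, Nat.succ_eq_add_one, List.take_succ_cons]
        cases htk : (pvSplitDots cs).take (k + 1) with
        | nil =>
          have h0 := congrArg List.length htk
          simp only [List.length_take, List.length_nil] at h0
          omega
        | cons b r =>
          rw [PySem.Chars.join_cons_cons]
          simp
    · rw [pvCandC_cons_ne _ _ hc, pvSplitDots_cons_ne _ hc, ih]
      cases hsp : pvSplitDots cs with
      | nil => exact absurd hsp (pvSplitDots_ne_nil cs)
      | cons a t =>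
        simp only [List.modifyHead_cons, List.length_cons]
        apply List.map_congr_left
        intro k hk
        simp only [List.take_succ_cons]
        have hjoin : ∀ r : List (List Char), PySem.Chars.join ['.'] ((c :: a) :: r)
            = c :: PySem.Chars.join ['.'] (a :: r) := by
          intro r
          cases r with
          | nil => simp [PySem.Chars.join_singleton]
          | cons b rr => rw [PySem.Chars.join_cons_cons, PySem.Chars.join_cons_cons]; simp
        rw [hjoin]
        simp

-- A's parts list (after .split(".")[0:-1]) mapped to chars is pvSplitDots minus its last part
lemma parts_toList (s : String) :
    (PySem.List.slice ((PySem.Str.split? s ".").getD []) (some 0) (some (-1))).map String.toList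
      = (pvSplitDots s.toList).dropLast := by
  have hmap := PySem.Str.split?_map s "."
  rw [PySem.Chars.split?.eq_1] at hmap
  rw [show (".".toList : List Char) = ['.'] from rfl] at hmap
  simp only [List.isEmpty_cons, if_false, Bool.false_eq_true] at hmap
  cases h : PySem.Str.split? s "." with
  | none => rw [h] at hmap; simp at hmap
  | some ps =>
    rw [h] at hmap
    simp only [Option.map_some, Option.some.injEq] at hmap
    simp only [Option.getD_some]
    rw [PySem.List.slice_zero_start, PySem.List.slice_to_neg_one,
        ← splitOn_eq_pvSplitDots, ← hmap, List.map_dropLast]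

-- Str.join is ofList of the char-level join
lemma strJoin_ofList (l : List String) :
    PySem.Str.join "." l = String.ofList (PySem.Chars.join ['.'] (l.map String.toList)) := by
  conv_lhs => rw [← String.ofList_toList (s := PySem.Str.join "." l)]
  rw [PySem.Str.toList_join]
  rfl

lemma A_eq (im : String) (mn : List String) :
    get_init_for_imported_module im mn
      = ((pvCandC [] im.toList).map String.ofList).foldl (pvAddIf mn) PySem.Set.empty := by
  simp only [get_init_for_imported_module]
  set P := PySem.List.slice ((PySem.Str.split? im ".").getD []) (some 0) (some (-1)) with hP
  rw [loopA mn (fun i => PySem.Str.join "." (PySem.List.slice P (some 0) (some i)))]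
  simp only [PySem.List.length_pyRange_one, Int.sub_zero, Int.toNat_natCast]
  have hPt : P.map String.toList = (pvSplitDots im.toList).dropLast := parts_toList im
  have hPlen : P.length = (pvSplitDots im.toList).length - 1 := by
    have := congrArg List.length hPt
    simpa using this
  rw [cand_eq im.toList [], List.map_map, hPlen]
  congr 1
  apply List.map_congr_left
  intro k hk
  simp only [List.mem_range] at hk
  simp only [Function.comp_apply, List.nil_append]
  rw [PySem.List.slice_zero_start, PySem.List.slice_to P (b := 1 + (k : Int)) (by omega),
      show ((1 : Int) + (k : Int)).toNat = k + 1 by omega]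
  rw [strJoin_ofList]
  congr 1
  rw [List.map_take, hPt, List.dropLast_eq_take, List.take_take]
  have hmin : min (k + 1) ((pvSplitDots im.toList).length - 1) = k + 1 := by omega
  rw [hmin]

lemma B_eq (im : String) (mn : List String) :
    get_init_for_imported_module_alt im mn
      = ((pvCandC [] im.toList).map String.ofList).foldl (pvAddIf mn) PySem.Set.empty := by
  simp only [get_init_for_imported_module_alt]
  rw [loopB mn im.toList PySem.Set.empty ""]
  rfl

-- ===== VERDICT (by name: the statement is the Claim_ definition above) =====
theorem get_init_for_imported_module_spec : Claim_equal_get_init_for_imported_module := by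
  intro imported_module module_names _
  unfold Spec_get_init_for_imported_module
  rw [A_eq, B_eq]
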